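-- pv_equiv track=rewrite | github.com/123oqwe/predictionmarkettradingbot1 | src/matching/matcher.py | _sources_compatible
-- ===== SOURCE A (Python) =====
-- def _sources_compatible(a: str, b: str) -> bool:
--     """Some resolution sources are interchangeable, others aren't.
--
--     Example: `fomc_statement` ≈ `federal_reserve_announcement` (same data
--     published minutes apart). `cme_settlement` ≠ `coinbase_spot_close`
--     (different prices, different times).
--
--     We keep this conservative: only mark equivalent when we've explicitly
--     whitelisted the pair. Default is "not compatible" — prefer false negatives
--     (rejected arbs) over false positives (losing money on rule divergence).
--     """
--     a_norm = a.strip().lower()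
--     b_norm = b.strip().lower()
--     if a_norm == b_norm:
--         return True
--
--     equivalence_classes = [
--         {"fomc_statement", "federal_reserve_announcement"},
--         {"associated_press", "ap_election_call", "ap_race_call"},
--         {"nba_box_score", "nba_official_scorebook"},
--     ]
--     return any(a_norm in cls and b_norm in cls for cls in equivalence_classes)
-- ===== SOURCE B (Python) =====
-- _CANONICAL = {
--     "fomc_statement": "fomc_statement",
--     "federal_reserve_announcement": "fomc_statement",
--     "associated_press": "associated_press",
--     "ap_election_call": "associated_press",
--     "ap_race_call": "associated_press",
--     "nba_box_score": "nba_box_score",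
--     "nba_official_scorebook": "nba_box_score",
-- }
--
--
-- def _canonical(s: str) -> str:
--     """Canonical representative of a resolution source (itself if not whitelisted)."""
--     n = s.strip().lower()
--     return _CANONICAL.get(n, n)
--
--
-- def _sources_compatible(a: str, b: str) -> bool:
--     return _canonical(a) == _canonical(b)
-- ===== Notes on version B (the rewrite author's own statement) =====
-- stated objective: idiomatic
-- what changed: Instead of an early-equality return plus a scan over whitelist sets testing joint membership of the pair, B rewrites each source independently to a canonical representative (itself when not whitelisted) and decides compatibility by a single equality of the two canonical forms; correctness holds because the representatives are the class members themselves, so an unknown source can never collide with a class representative without being that class member.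
import Mathlib
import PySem

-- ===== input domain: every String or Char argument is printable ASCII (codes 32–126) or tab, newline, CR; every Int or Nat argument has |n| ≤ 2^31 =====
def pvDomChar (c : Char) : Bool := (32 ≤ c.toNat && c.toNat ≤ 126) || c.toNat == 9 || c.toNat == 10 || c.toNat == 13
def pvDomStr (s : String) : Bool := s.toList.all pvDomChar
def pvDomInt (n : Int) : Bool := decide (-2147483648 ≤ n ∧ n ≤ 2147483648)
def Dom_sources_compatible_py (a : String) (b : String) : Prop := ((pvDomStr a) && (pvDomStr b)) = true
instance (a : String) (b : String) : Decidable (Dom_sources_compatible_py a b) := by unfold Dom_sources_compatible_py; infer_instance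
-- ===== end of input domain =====

-- B replaces A's early-equality test plus scan over whitelist sets by canonicalization:
-- each source is rewritten independently to a class representative and one equality decides (idiomatic, same cost).

-- ===== PORT A =====
-- literal port of A: normalize, early-equal, then any() over the three whitelisted equivalence classes
def sources_compatible_py (a : String) (b : String) : Bool :=
  let a_norm := PySem.Str.lower (PySem.Str.strip a)
  let b_norm := PySem.Str.lower (PySem.Str.strip b)
  if a_norm == b_norm then true
  else
    ([PySem.Set.ofList ["fomc_statement", "federal_reserve_announcement"],
      PySem.Set.ofList ["associated_press", "ap_election_call", "ap_race_call"],
      PySem.Set.ofList ["nba_box_score", "nba_official_scorebook"]] : List (PySem.Set String)).any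
      (fun cls => PySem.Set.contains cls a_norm && PySem.Set.contains cls b_norm)

-- ===== PORT B =====
-- the module-level dict _CANONICAL of Source B
def pvCanonDict : PySem.Dict String String :=
  PySem.Dict.ofList
    [("fomc_statement", "fomc_statement"), ("federal_reserve_announcement", "fomc_statement"),
     ("associated_press", "associated_press"), ("ap_election_call", "associated_press"),
     ("ap_race_call", "associated_press"),
     ("nba_box_score", "nba_box_score"), ("nba_official_scorebook", "nba_box_score")]

-- port of Source B's _canonical: normalize, then _CANONICAL.get(n, n)
def pvCanonical (s : String) : String :=
  let n := PySem.Str.lower (PySem.Str.strip s)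
  PySem.Dict.getD pvCanonDict n n

-- port of B: one equality of the two canonical forms
def sources_compatible_py_alt (a : String) (b : String) : Bool :=
  pvCanonical a == pvCanonical b

-- ===== PRECONDITION & SPEC =====
def Spec_sources_compatible_py (a : String) (b : String) (out : Bool) : Prop := out = sources_compatible_py_alt a b
instance (a : String) (b : String) (out : Bool) : Decidable (Spec_sources_compatible_py a b out) := by unfold Spec_sources_compatible_py; infer_instance

-- ===== CLAIM (what is proved, stated in full; the proofs are below) =====
def Claim_equal_sources_compatible_py : Prop := ∀ (a : String) (b : String), Dom_sources_compatible_py a b → Spec_sources_compatible_py a b (sources_compatible_py a b)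

-- ===== LEMMAS AND PROOFS =====

lemma pvCanonDict_eq : pvCanonDict = PySem.Dict.mk
    [("fomc_statement", "fomc_statement"), ("federal_reserve_announcement", "fomc_statement"),
     ("associated_press", "associated_press"), ("ap_election_call", "associated_press"),
     ("ap_race_call", "associated_press"),
     ("nba_box_score", "nba_box_score"), ("nba_official_scorebook", "nba_box_score")] := by decide

-- after normalization both ports are the same function of the two normalized strings;
-- full case analysis on which whitelist key (if any) each normalized string is
lemma pv_core_eq (s t : String) :
    (if s == t then true
     else
       ([PySem.Set.ofList ["fomc_statement", "federal_reserve_announcement"],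
         PySem.Set.ofList ["associated_press", "ap_election_call", "ap_race_call"],
         PySem.Set.ofList ["nba_box_score", "nba_official_scorebook"]] : List (PySem.Set String)).any
         (fun cls => PySem.Set.contains cls s && PySem.Set.contains cls t))
    = (PySem.Dict.getD pvCanonDict s s == PySem.Dict.getD pvCanonDict t t) := by
  by_cases hst : s = t
  · subst hst
    simp
  have h : (s == t) = false := by simpa using hst
  simp only [h, Bool.false_eq_true, if_false]
  by_cases hs1 : s = "fomc_statement"
  · subst hs1
    by_cases ht1 : t = "fomc_statement"
    · subst ht1
      decide
    by_cases ht2 : t = "federal_reserve_announcement"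
    · subst ht2
      decide
    by_cases ht3 : t = "associated_press"
    · subst ht3
      decide
    by_cases ht4 : t = "ap_election_call"
    · subst ht4
      decide
    by_cases ht5 : t = "ap_race_call"
    · subst ht5
      decide
    by_cases ht6 : t = "nba_box_score"
    · subst ht6
      decide
    by_cases ht7 : t = "nba_official_scorebook"
    · subst ht7
      decide
    simp [PySem.Set.ofList, PySem.Set.add, PySem.Set.contains, pvCanonDict_eq, PySem.Dict.getD, PySem.Dict.get?, ht1, ht2, ht3, ht4, ht5, ht6, ht7, Ne.symm ht1, Ne.symm ht2, Ne.symm ht3, Ne.symm ht4, Ne.symm ht5, Ne.symm ht6, Ne.symm ht7, h]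
  by_cases hs2 : s = "federal_reserve_announcement"
  · subst hs2
    by_cases ht1 : t = "fomc_statement"
    · subst ht1
      decide
    by_cases ht2 : t = "federal_reserve_announcement"
    · subst ht2
      decide
    by_cases ht3 : t = "associated_press"
    · subst ht3
      decide
    by_cases ht4 : t = "ap_election_call"
    · subst ht4
      decide
    by_cases ht5 : t = "ap_race_call"
    · subst ht5
      decide
    by_cases ht6 : t = "nba_box_score"
    · subst ht6
      decide
    by_cases ht7 : t = "nba_official_scorebook"
    · subst ht7
      decide
    simp [PySem.Set.ofList, PySem.Set.add, PySem.Set.contains, pvCanonDict_eq, PySem.Dict.getD, PySem.Dict.get?, ht1, ht2, ht3, ht4, ht5, ht6, ht7, Ne.symm ht1, Ne.symm ht2, Ne.symm ht3, Ne.symm ht4, Ne.symm ht5, Ne.symm ht6, Ne.symm ht7, h]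
  by_cases hs3 : s = "associated_press"
  · subst hs3
    by_cases ht1 : t = "fomc_statement"
    · subst ht1
      decide
    by_cases ht2 : t = "federal_reserve_announcement"
    · subst ht2
      decide
    by_cases ht3 : t = "associated_press"
    · subst ht3
      decide
    by_cases ht4 : t = "ap_election_call"
    · subst ht4
      decide
    by_cases ht5 : t = "ap_race_call"
    · subst ht5
      decide
    by_cases ht6 : t = "nba_box_score"
    · subst ht6
      decide
    by_cases ht7 : t = "nba_official_scorebook"
    · subst ht7
      decide
    simp [PySem.Set.ofList, PySem.Set.add, PySem.Set.contains, pvCanonDict_eq, PySem.Dict.getD, PySem.Dict.get?, ht1, ht2, ht3, ht4, ht5, ht6, ht7, Ne.symm ht1, Ne.symm ht2, Ne.symm ht3, Ne.symm ht4, Ne.symm ht5, Ne.symm ht6, Ne.symm ht7, h]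
  by_cases hs4 : s = "ap_election_call"
  · subst hs4
    by_cases ht1 : t = "fomc_statement"
    · subst ht1
      decide
    by_cases ht2 : t = "federal_reserve_announcement"
    · subst ht2
      decide
    by_cases ht3 : t = "associated_press"
    · subst ht3
      decide
    by_cases ht4 : t = "ap_election_call"
    · subst ht4
      decide
    by_cases ht5 : t = "ap_race_call"
    · subst ht5
      decide
    by_cases ht6 : t = "nba_box_score"
    · subst ht6
      decide
    by_cases ht7 : t = "nba_official_scorebook"
    · subst ht7
      decide
    simp [PySem.Set.ofList, PySem.Set.add, PySem.Set.contains, pvCanonDict_eq, PySem.Dict.getD, PySem.Dict.get?, ht1, ht2, ht3, ht4, ht5, ht6, ht7, Ne.symm ht1, Ne.symm ht2, Ne.symm ht3, Ne.symm ht4, Ne.symm ht5, Ne.symm ht6, Ne.symm ht7, h]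
  by_cases hs5 : s = "ap_race_call"
  · subst hs5
    by_cases ht1 : t = "fomc_statement"
    · subst ht1
      decide
    by_cases ht2 : t = "federal_reserve_announcement"
    · subst ht2
      decide
    by_cases ht3 : t = "associated_press"
    · subst ht3
      decide
    by_cases ht4 : t = "ap_election_call"
    · subst ht4
      decide
    by_cases ht5 : t = "ap_race_call"
    · subst ht5
      decide
    by_cases ht6 : t = "nba_box_score"
    · subst ht6
      decide
    by_cases ht7 : t = "nba_official_scorebook"
    · subst ht7
      decide
    simp [PySem.Set.ofList, PySem.Set.add, PySem.Set.contains, pvCanonDict_eq, PySem.Dict.getD, PySem.Dict.get?, ht1, ht2, ht3, ht4, ht5, ht6, ht7, Ne.symm ht1, Ne.symm ht2, Ne.symm ht3, Ne.symm ht4, Ne.symm ht5, Ne.symm ht6, Ne.symm ht7, h]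
  by_cases hs6 : s = "nba_box_score"
  · subst hs6
    by_cases ht1 : t = "fomc_statement"
    · subst ht1
      decide
    by_cases ht2 : t = "federal_reserve_announcement"
    · subst ht2
      decide
    by_cases ht3 : t = "associated_press"
    · subst ht3
      decide
    by_cases ht4 : t = "ap_election_call"
    · subst ht4
      decide
    by_cases ht5 : t = "ap_race_call"
    · subst ht5
      decide
    by_cases ht6 : t = "nba_box_score"
    · subst ht6
      decide
    by_cases ht7 : t = "nba_official_scorebook"
    · subst ht7
      decide
    simp [PySem.Set.ofList, PySem.Set.add, PySem.Set.contains, pvCanonDict_eq, PySem.Dict.getD, PySem.Dict.get?, ht1, ht2, ht3, ht4, ht5, ht6, ht7, Ne.symm ht1, Ne.symm ht2, Ne.symm ht3, Ne.symm ht4, Ne.symm ht5, Ne.symm ht6, Ne.symm ht7, h]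
  by_cases hs7 : s = "nba_official_scorebook"
  · subst hs7
    by_cases ht1 : t = "fomc_statement"
    · subst ht1
      decide
    by_cases ht2 : t = "federal_reserve_announcement"
    · subst ht2
      decide
    by_cases ht3 : t = "associated_press"
    · subst ht3
      decide
    by_cases ht4 : t = "ap_election_call"
    · subst ht4
      decide
    by_cases ht5 : t = "ap_race_call"
    · subst ht5
      decide
    by_cases ht6 : t = "nba_box_score"
    · subst ht6
      decide
    by_cases ht7 : t = "nba_official_scorebook"
    · subst ht7
      decide
    simp [PySem.Set.ofList, PySem.Set.add, PySem.Set.contains, pvCanonDict_eq, PySem.Dict.getD, PySem.Dict.get?, ht1, ht2, ht3, ht4, ht5, ht6, ht7, Ne.symm ht1, Ne.symm ht2, Ne.symm ht3, Ne.symm ht4, Ne.symm ht5, Ne.symm ht6, Ne.symm ht7, h]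
  by_cases ht1 : t = "fomc_statement"
  · subst ht1
    simp [PySem.Set.ofList, PySem.Set.add, PySem.Set.contains, pvCanonDict_eq, PySem.Dict.getD, PySem.Dict.get?, hs1, hs2, hs3, hs4, hs5, hs6, hs7, Ne.symm hs1, Ne.symm hs2, Ne.symm hs3, Ne.symm hs4, Ne.symm hs5, Ne.symm hs6, Ne.symm hs7, h]
  by_cases ht2 : t = "federal_reserve_announcement"
  · subst ht2
    simp [PySem.Set.ofList, PySem.Set.add, PySem.Set.contains, pvCanonDict_eq, PySem.Dict.getD, PySem.Dict.get?, hs1, hs2, hs3, hs4, hs5, hs6, hs7, Ne.symm hs1, Ne.symm hs2, Ne.symm hs3, Ne.symm hs4, Ne.symm hs5, Ne.symm hs6, Ne.symm hs7, h]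
  by_cases ht3 : t = "associated_press"
  · subst ht3
    simp [PySem.Set.ofList, PySem.Set.add, PySem.Set.contains, pvCanonDict_eq, PySem.Dict.getD, PySem.Dict.get?, hs1, hs2, hs3, hs4, hs5, hs6, hs7, Ne.symm hs1, Ne.symm hs2, Ne.symm hs3, Ne.symm hs4, Ne.symm hs5, Ne.symm hs6, Ne.symm hs7, h]
  by_cases ht4 : t = "ap_election_call"
  · subst ht4
    simp [PySem.Set.ofList, PySem.Set.add, PySem.Set.contains, pvCanonDict_eq, PySem.Dict.getD, PySem.Dict.get?, hs1, hs2, hs3, hs4, hs5, hs6, hs7, Ne.symm hs1, Ne.symm hs2, Ne.symm hs3, Ne.symm hs4, Ne.symm hs5, Ne.symm hs6, Ne.symm hs7, h]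
  by_cases ht5 : t = "ap_race_call"
  · subst ht5
    simp [PySem.Set.ofList, PySem.Set.add, PySem.Set.contains, pvCanonDict_eq, PySem.Dict.getD, PySem.Dict.get?, hs1, hs2, hs3, hs4, hs5, hs6, hs7, Ne.symm hs1, Ne.symm hs2, Ne.symm hs3, Ne.symm hs4, Ne.symm hs5, Ne.symm hs6, Ne.symm hs7, h]
  by_cases ht6 : t = "nba_box_score"
  · subst ht6
    simp [PySem.Set.ofList, PySem.Set.add, PySem.Set.contains, pvCanonDict_eq, PySem.Dict.getD, PySem.Dict.get?, hs1, hs2, hs3, hs4, hs5, hs6, hs7, Ne.symm hs1, Ne.symm hs2, Ne.symm hs3, Ne.symm hs4, Ne.symm hs5, Ne.symm hs6, Ne.symm hs7, h]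
  by_cases ht7 : t = "nba_official_scorebook"
  · subst ht7
    simp [PySem.Set.ofList, PySem.Set.add, PySem.Set.contains, pvCanonDict_eq, PySem.Dict.getD, PySem.Dict.get?, hs1, hs2, hs3, hs4, hs5, hs6, hs7, Ne.symm hs1, Ne.symm hs2, Ne.symm hs3, Ne.symm hs4, Ne.symm hs5, Ne.symm hs6, Ne.symm hs7, h]
  simp [PySem.Set.ofList, PySem.Set.add, PySem.Set.contains, pvCanonDict_eq, PySem.Dict.getD, PySem.Dict.get?, hs1, hs2, hs3, hs4, hs5, hs6, hs7, Ne.symm hs1, Ne.symm hs2, Ne.symm hs3, Ne.symm hs4, Ne.symm hs5, Ne.symm hs6, Ne.symm hs7, ht1, ht2, ht3, ht4, ht5, ht6, ht7, Ne.symm ht1, Ne.symm ht2, Ne.symm ht3, Ne.symm ht4, Ne.symm ht5, Ne.symm ht6, Ne.symm ht7, h]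

-- ===== VERDICT (by name: the statement is the Claim_ definition above) =====
theorem sources_compatible_py_spec : Claim_equal_sources_compatible_py := by
  intro a b _
  show sources_compatible_py a b = sources_compatible_py_alt a b
  unfold sources_compatible_py sources_compatible_py_alt pvCanonical
  exact pv_core_eq (PySem.Str.lower (PySem.Str.strip a)) (PySem.Str.lower (PySem.Str.strip b))
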